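-- pv_equiv track=rewrite | github.com/Muhazerin/mdp-algorithm | temp.py | compressStepSeq
-- ===== SOURCE A (Python) =====
-- def compressStepSeq(step_seq):
--     forward_count = 0
--     seq = []
--     for step in step_seq:
--         if step == 'w':
--             forward_count = forward_count + 1
--             if forward_count == 9:
--                 seq.append('w{x}'.format(x=forward_count))
--                 forward_count = 0
--         else:
--             seq.append('w{x}'.format(x=forward_count))
--             seq.append(step)
--             forward_count = 0
--     if forward_count > 0:
--         seq.append('w{x}'.format(x=forward_count))
--     return seq
-- ===== SOURCE B (Python) =====
-- def compressStepSeq(step_seq):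
--     # Run-based: scan maximal runs with two indices instead of per-step counter updates.
--     out = []
--     carry = 0
--     i = 0
--     n = len(step_seq)
--     while i < n:
--         j = i
--         if step_seq[i] == 'w':
--             while j < n and step_seq[j] == 'w':
--                 j += 1
--             run = j - i
--             out.extend(['w9'] * (run // 9))
--             carry = run % 9
--         else:
--             while j < n and step_seq[j] != 'w':
--                 j += 1
--             for k in range(i, j):
--                 out.append('w%d' % (carry if k == i else 0))
--                 out.append(step_seq[k])
--             carry = 0
--         i = j
--     if carry > 0:
--         out.append('w%d' % carry)
--     return out
-- ===== Notes on version B (the rewrite author's own statement) =====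
-- stated objective: alternative
-- what changed: Replaces A's per-element counter loop by a run-based two-pointer scan: each maximal run of 'w' emits 'w9' run//9 times with carry run%9, each non-'w' run emits 'w{carry}'/'w0' prefixes directly.
import Mathlib
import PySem

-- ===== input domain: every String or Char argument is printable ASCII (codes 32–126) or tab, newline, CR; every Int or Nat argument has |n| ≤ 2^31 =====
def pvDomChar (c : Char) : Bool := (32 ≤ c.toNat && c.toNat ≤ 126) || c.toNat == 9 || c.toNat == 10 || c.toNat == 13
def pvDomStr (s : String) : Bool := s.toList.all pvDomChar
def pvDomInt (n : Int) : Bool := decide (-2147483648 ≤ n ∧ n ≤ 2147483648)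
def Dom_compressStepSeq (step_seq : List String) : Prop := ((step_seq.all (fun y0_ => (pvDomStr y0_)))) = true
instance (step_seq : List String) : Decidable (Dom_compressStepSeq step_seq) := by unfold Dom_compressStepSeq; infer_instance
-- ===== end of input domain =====

-- B replaces A's per-element counter loop by a run-based two-pointer scan (alternative decomposition, same cost).

-- 'w{x}'.format(x=n)
def pvWtag (n : Nat) : String := "w" ++ PySem.Int.toStr (n : Int)

-- ===== PORT A =====
-- A's loop over (forward_count, seq)
def pvALoop : Nat → List String → List String → Nat × List String
  | c, seq, [] => (c, seq)
  | c, seq, step :: rest =>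
    if step == "w" then
      if c + 1 == 9 then pvALoop 0 (seq ++ [pvWtag (c + 1)]) rest
      else pvALoop (c + 1) seq rest
    else pvALoop 0 (seq ++ [pvWtag c, step]) rest

def compressStepSeq (step_seq : List String) : List String :=
  let r := pvALoop 0 [] step_seq
  if r.1 > 0 then r.2 ++ [pvWtag r.1] else r.2

-- ===== PORT B =====
-- B's outer while-loop over maximal runs (the inner index scans are the takeWhile/dropWhile splits)
def pvBLoop (carry : Nat) (l : List String) : List String :=
  match l with
  | [] => if carry > 0 then [pvWtag carry] else []
  | x :: xs =>
    if x == "w" then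
      let run := (xs.takeWhile (fun s => s == "w")).length + 1
      let rest := xs.dropWhile (fun s => s == "w")
      List.replicate (run / 9) "w9" ++ pvBLoop (run % 9) rest
    else
      let g := xs.takeWhile (fun s => !(s == "w"))
      let rest := xs.dropWhile (fun s => !(s == "w"))
      pvWtag carry :: x :: g.flatMap (fun s => [pvWtag 0, s]) ++ pvBLoop 0 rest
termination_by l.length
decreasing_by
  · have := List.length_dropWhile_le (p := fun s => s == "w") (l := xs); simp; omega
  · have := List.length_dropWhile_le (p := fun s => !(s == "w")) (l := xs); simp; omega

def compressStepSeq_alt (step_seq : List String) : List String := pvBLoop 0 step_seq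

-- ===== PRECONDITION & SPEC =====
def Spec_compressStepSeq (step_seq : List String) (out : List String) : Prop := out = compressStepSeq_alt step_seq
instance (step_seq : List String) (out : List String) : Decidable (Spec_compressStepSeq step_seq out) := by unfold Spec_compressStepSeq; infer_instance

-- ===== CLAIM (what is proved, stated in full; the proofs are below) =====
def Claim_equal_compressStepSeq : Prop := ∀ (step_seq : List String), Dom_compressStepSeq step_seq → Spec_compressStepSeq step_seq (compressStepSeq step_seq)

-- ===== LEMMAS AND PROOFS =====

-- common recursive specification: A's loop written output-directly
def pvF : Nat → List String → List String
  | c, [] => if c > 0 then [pvWtag c] else []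
  | c, s :: l =>
    if s == "w" then
      (if c + 1 == 9 then pvWtag 9 :: pvF 0 l else pvF (c + 1) l)
    else pvWtag c :: s :: pvF 0 l

theorem pvWtag9 : pvWtag 9 = "w9" := by decide

theorem pvALoop_acc (l : List String) : ∀ (c : Nat) (seq : List String),
    pvALoop c seq l = ((pvALoop c [] l).1, seq ++ (pvALoop c [] l).2) := by
  induction l with
  | nil => intro c seq; simp [pvALoop]
  | cons s rest ih =>
    intro c seq
    by_cases hw : s == "w"
    · by_cases h9 : c + 1 == 9
      · simp only [pvALoop, hw, h9, if_true, List.nil_append]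
        rw [ih, ih ((0:Nat)) [pvWtag (c+1)]]; simp
      · simp only [pvALoop, hw, if_true, if_neg h9]
        rw [ih]
    · simp only [pvALoop, if_neg hw, List.nil_append]
      rw [ih, ih ((0:Nat)) [pvWtag c, s]]; simp

-- A equals the common spec
theorem pvA_eq_F (l : List String) : ∀ (c : Nat),
    (if (pvALoop c [] l).1 > 0 then (pvALoop c [] l).2 ++ [pvWtag (pvALoop c [] l).1]
     else (pvALoop c [] l).2) = pvF c l := by
  induction l with
  | nil => intro c; simp [pvALoop, pvF]
  | cons s rest ih =>
    intro c
    by_cases hw : s == "w"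
    · by_cases h9 : c + 1 == 9
      · have h9' : c + 1 = 9 := by simpa using h9
        have e : pvALoop c [] (s :: rest) = pvALoop 0 [pvWtag (c + 1)] rest := by
          simp [pvALoop, hw, h9]
        have e2 : pvF c (s :: rest) = pvWtag 9 :: pvF 0 rest := by
          simp [pvF, hw, h9]
        rw [e, pvALoop_acc rest 0 [pvWtag (c + 1)], e2, h9', ← ih 0]
        split <;> simp
      · have e : pvALoop c [] (s :: rest) = pvALoop (c + 1) [] rest := by
          simp [pvALoop, hw, h9]
        have e2 : pvF c (s :: rest) = pvF (c + 1) rest := by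
          simp [pvF, hw, h9]
        rw [e, e2, ← ih (c + 1)]
    · have e : pvALoop c [] (s :: rest) = pvALoop 0 [pvWtag c, s] rest := by
        simp [pvALoop, hw]
      have e2 : pvF c (s :: rest) = pvWtag c :: s :: pvF 0 rest := by
        simp [pvF, hw]
      rw [e, pvALoop_acc rest 0 [pvWtag c, s], e2, ← ih 0]
      split <;> simp

-- F on a block of m 'w's
theorem pvF_wrun (m : Nat) : ∀ (c : Nat) (rest : List String), c < 9 →
    pvF c (List.replicate m "w" ++ rest)
      = List.replicate ((c + m) / 9) (pvWtag 9) ++ pvF ((c + m) % 9) rest := by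
  induction m with
  | zero =>
    intro c rest hc
    have h1 : c / 9 = 0 := Nat.div_eq_of_lt hc
    have h2 : c % 9 = c := Nat.mod_eq_of_lt hc
    simp [h1, h2]
  | succ m ih =>
    intro c rest hc
    simp only [List.replicate_succ, List.cons_append, pvF, if_pos (by rfl : ("w" == "w") = true)]
    by_cases h9 : c + 1 == 9
    · have hc9 : c = 8 := by have := of_decide_eq_true h9; omega
      rw [if_pos h9, ih 0 rest (by omega)]
      subst hc9
      have hd : (8 + (m + 1)) / 9 = m / 9 + 1 := by
        have : 8 + (m + 1) = m + 9 := by omega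
        rw [this, Nat.add_div_right _ (by omega)]
      have hm : (8 + (m + 1)) % 9 = m % 9 := by
        have : 8 + (m + 1) = m + 9 := by omega
        rw [this, Nat.add_mod_right]
      rw [hd, hm]
      simp [List.replicate_succ]
    · have hlt : c + 1 < 9 := by
        have : ¬ (c + 1 = 9) := by simpa using h9
        omega
      rw [if_neg h9, ih (c + 1) rest hlt]
      have : c + 1 + m = c + (m + 1) := by omega
      rw [this]

-- F on a block with no 'w'
theorem pvF_nonw (g : List String) : ∀ (rest : List String),
    (∀ y ∈ g, (y == "w") = false) →
    pvF 0 (g ++ rest) = g.flatMap (fun s => [pvWtag 0, s]) ++ pvF 0 rest := by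
  induction g with
  | nil => intro rest _; simp
  | cons y g ih =>
    intro rest hg
    have hy : (y == "w") = false := hg y (by simp)
    simp only [List.cons_append, pvF, if_neg (by simp [hy] : ¬ ((y == "w") = true))]
    rw [ih rest (fun z hz => hg z (by simp [hz]))]
    simp

theorem pvHead_dropWhile {p : String → Bool} :
    ∀ (l : List String) (x : String), (l.dropWhile p).head? = some x → p x = false := by
  intro l
  induction l with
  | nil => intro x h; simp [List.dropWhile] at h
  | cons a l ih =>
    intro x h
    by_cases ha : p a
    · rw [List.dropWhile_cons_of_pos ha] at h; exact ih x h
    · rw [List.dropWhile_cons_of_neg ha] at h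
      simp at h
      subst h
      simpa using ha

-- B equals the common spec
theorem pvB_eq_F : ∀ (k : Nat) (l : List String) (c : Nat), l.length ≤ k → c < 9 →
    (l.head? = some "w" → c = 0) → pvBLoop c l = pvF c l := by
  intro k
  induction k with
  | zero =>
    intro l c hk _ _
    have : l = [] := by cases l <;> simp_all
    subst this
    simp [pvBLoop, pvF]
  | succ k ih =>
    intro l c hk hc hh
    match l with
    | [] => simp [pvBLoop, pvF]
    | x :: xs =>
      by_cases hw : x == "w"
      · have hx : x = "w" := by simpa using hw
        have hc0 : c = 0 := hh (by simp [hx])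
        subst hc0; subst hx
        rw [pvBLoop]
        simp only [if_pos (by rfl : ("w" == "w") = true)]
        set g := xs.takeWhile (fun s => s == "w") with hg
        set rest := xs.dropWhile (fun s => s == "w") with hrest
        have hsplit : xs = g ++ rest := (List.takeWhile_append_dropWhile).symm
        have hgrep : g = List.replicate g.length "w" := by
          apply List.eq_replicate_of_mem
          intro y hy
          have := List.mem_takeWhile_imp (l := xs) (p := fun s => s == "w") (by rw [← hg]; exact hy)
          simpa using this
        have hrec : pvBLoop ((g.length + 1) % 9) rest = pvF ((g.length + 1) % 9) rest := by
          apply ih rest ((g.length + 1) % 9)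
          · have h1 : rest.length ≤ xs.length := List.length_dropWhile_le _ _
            simp at hk; omega
          · omega
          · intro h
            have := pvHead_dropWhile (p := fun s => s == "w") xs "w" h
            simp at this
        rw [hrec]
        have : ("w" :: xs) = List.replicate (g.length + 1) "w" ++ rest := by
          rw [List.replicate_succ, List.cons_append, ← hgrep, ← hsplit]
        rw [this, pvF_wrun (g.length + 1) 0 rest (by omega)]
        simp [pvWtag9]
      · rw [pvBLoop]
        rw [if_neg hw]
        dsimp only
        set g := xs.takeWhile (fun s => !(s == "w")) with hg
        set rest := xs.dropWhile (fun s => !(s == "w")) with hrest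
        have hsplit : xs = g ++ rest := (List.takeWhile_append_dropWhile).symm
        have hrec : pvBLoop 0 rest = pvF 0 rest := by
          apply ih rest 0
          · have h1 : rest.length ≤ xs.length := List.length_dropWhile_le _ _
            simp at hk; omega
          · omega
          · intro _; rfl
        rw [hrec]
        have hng : ∀ y ∈ g, (y == "w") = false := by
          intro y hy
          have := List.mem_takeWhile_imp (l := xs) (p := fun s => !(s == "w")) (by rw [← hg]; exact hy)
          simpa using this
        rw [pvF, if_neg hw, hsplit, pvF_nonw g rest hng]
        simp

-- ===== VERDICT (by name: the statement is the Claim_ definition above) =====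
theorem compressStepSeq_spec : Claim_equal_compressStepSeq := by
  intro l _
  show compressStepSeq l = compressStepSeq_alt l
  unfold compressStepSeq compressStepSeq_alt
  rw [pvB_eq_F l.length l 0 le_rfl (by omega) (fun _ => rfl)]
  exact pvA_eq_F l 0
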